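-- pv_equiv track=rewrite | github.com/yutori-ai/navi-bench | navi_bench/resy/resy_url_match.py | get_venue_slug
-- ===== SOURCE A (Python) =====
-- VENUE_SLUG_MAPPING = {
--     "carbone": "carbone",
--     "rubirosa": "rubirosa",
--     "coqodaq": "coqodaq",
--     "lilia": "lilia",
--     "4 charles prime rib": "4-charles-prime-rib",
--     "torrisi": "torrisi",
--     "monkey bar": "monkey-bar-nyc",
--     "via carota": "via-carota",
--     "le gratin": "le-gratin",
--     "crevette": "crevette",
--     "pastis": "pastis",
--     "misi": "misi",
--     "pasquale jones": "pasquale-jones",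
--     "charlie bird": "charlie-bird",
--     "hanoi house": "hanoi-house",
--     "laser wolf brooklyn": "laser-wolf-brooklyn",
--     "shukette": "shukette",
--     "shuka": "shuka",
--     "cookshop": "cookshop",
--     "jules": "jules",
--     "mr. pollo": "mr-pollo",
--     "piccino presidio": "piccino-presidio",
--     "the morris": "the-morris",
--     "collina": "collina",
--     "pearl 6101": "pearl",
--     "flour + water": "flour-and-water",
--     "7 adams": "7-adams",
--     "nari": "nari",
--     "flour + water pizzeria - north beach": "fw-pizzeria-north-beach",
--     "casaro osteria": "casaro-osteria",
--     "napizza": "napizza",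
--     "sisterita": "sisterita",
--     "mission chinese food sf": "mission-chinese-food-sf",
--     "shuggie's": "shuggies",
--     "penny roma": "penny-roma",
--     "brenda's meat & three": "brendas-meat-and-three",
--     "spqr": "spqr",
--     "wizards and wands": "wizards-and-wands",
--     "kin khao": "kin-khao",
-- }
--
-- def get_venue_slug(restaurant_name: str) -> str:
--     """Get the Resy venue slug for a restaurant name."""
--     name_lower = restaurant_name.lower()
--     if name_lower in VENUE_SLUG_MAPPING:
--         return VENUE_SLUG_MAPPING[name_lower]
--     else:
--         # Fallback: simple slugification
--         slug = name_lower.replace(" ", "-").replace("+", "").replace("'", "").replace("&", "and")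
--         # Remove special characters
--         slug = "".join(c for c in slug if c.isalnum() or c == "-")
--         # Remove multiple dashes
--         while "--" in slug:
--             slug = slug.replace("--", "-")
--         return slug.strip("-")
-- ===== SOURCE B (Python) =====
-- VENUE_SLUG_MAPPING = {
--     "carbone": "carbone",
--     "rubirosa": "rubirosa",
--     "coqodaq": "coqodaq",
--     "lilia": "lilia",
--     "4 charles prime rib": "4-charles-prime-rib",
--     "torrisi": "torrisi",
--     "monkey bar": "monkey-bar-nyc",
--     "via carota": "via-carota",
--     "le gratin": "le-gratin",
--     "crevette": "crevette",
--     "pastis": "pastis",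
--     "misi": "misi",
--     "pasquale jones": "pasquale-jones",
--     "charlie bird": "charlie-bird",
--     "hanoi house": "hanoi-house",
--     "laser wolf brooklyn": "laser-wolf-brooklyn",
--     "shukette": "shukette",
--     "shuka": "shuka",
--     "cookshop": "cookshop",
--     "jules": "jules",
--     "mr. pollo": "mr-pollo",
--     "piccino presidio": "piccino-presidio",
--     "the morris": "the-morris",
--     "collina": "collina",
--     "pearl 6101": "pearl",
--     "flour + water": "flour-and-water",
--     "7 adams": "7-adams",
--     "nari": "nari",
--     "flour + water pizzeria - north beach": "fw-pizzeria-north-beach",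
--     "casaro osteria": "casaro-osteria",
--     "napizza": "napizza",
--     "sisterita": "sisterita",
--     "mission chinese food sf": "mission-chinese-food-sf",
--     "shuggie's": "shuggies",
--     "penny roma": "penny-roma",
--     "brenda's meat & three": "brendas-meat-and-three",
--     "spqr": "spqr",
--     "wizards and wands": "wizards-and-wands",
--     "kin khao": "kin-khao",
-- }
--
-- def get_venue_slug(restaurant_name: str) -> str:
--     """Get the Resy venue slug for a restaurant name."""
--     name_lower = restaurant_name.lower()
--     if name_lower in VENUE_SLUG_MAPPING:
--         return VENUE_SLUG_MAPPING[name_lower]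
--     # Fallback: slugify in a single pass with a pending-dash flag.
--     out = []
--     pending = False  # a separator was seen since the last emitted character
--     for c in name_lower:
--         if c == " " or c == "-":
--             pending = True
--         elif c == "&":
--             if pending and out:
--                 out.append("-")
--             out.append("and")
--             pending = False
--         elif c.isalnum():
--             if pending and out:
--                 out.append("-")
--             out.append(c)
--             pending = False
--         # every other character is simply dropped
--     return "".join(out)
-- ===== Notes on version B (the rewrite author's own statement) =====
-- stated objective: alternative
-- what changed: The fallback slugification's four chained str.replace passes, a filtering comprehension, a repeated dash-collapsing while loop and a final strip of dashes are replaced by a single left-to-right pass over the lowered name that keeps a pending-dash flag and emits each character (or the word 'and' for an ampersand) at most once.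
import Mathlib
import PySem

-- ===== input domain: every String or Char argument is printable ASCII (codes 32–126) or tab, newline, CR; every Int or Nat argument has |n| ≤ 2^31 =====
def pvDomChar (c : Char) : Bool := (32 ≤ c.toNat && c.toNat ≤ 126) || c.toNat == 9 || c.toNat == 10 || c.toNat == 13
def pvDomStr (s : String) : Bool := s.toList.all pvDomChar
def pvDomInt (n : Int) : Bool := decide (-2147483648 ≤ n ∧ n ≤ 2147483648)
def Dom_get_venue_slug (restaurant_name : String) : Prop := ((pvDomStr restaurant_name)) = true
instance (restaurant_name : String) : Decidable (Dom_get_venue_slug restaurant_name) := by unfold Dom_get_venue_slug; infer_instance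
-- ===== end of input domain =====

-- B replaces A's chained .replace()/filter/while-collapse/strip fallback by one left-to-right pass
-- with a pending-dash flag (objective: alternative decomposition).

-- ===== PORT A =====
-- module-level constant VENUE_SLUG_MAPPING (shared data, used by both ports as in Python)
def venueMapping : PySem.Dict String String := PySem.Dict.ofList [
  ("carbone", "carbone"), ("rubirosa", "rubirosa"), ("coqodaq", "coqodaq"), ("lilia", "lilia"),
  ("4 charles prime rib", "4-charles-prime-rib"), ("torrisi", "torrisi"), ("monkey bar", "monkey-bar-nyc"),
  ("via carota", "via-carota"), ("le gratin", "le-gratin"), ("crevette", "crevette"), ("pastis", "pastis"),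
  ("misi", "misi"), ("pasquale jones", "pasquale-jones"), ("charlie bird", "charlie-bird"),
  ("hanoi house", "hanoi-house"), ("laser wolf brooklyn", "laser-wolf-brooklyn"), ("shukette", "shukette"),
  ("shuka", "shuka"), ("cookshop", "cookshop"), ("jules", "jules"), ("mr. pollo", "mr-pollo"),
  ("piccino presidio", "piccino-presidio"), ("the morris", "the-morris"), ("collina", "collina"),
  ("pearl 6101", "pearl"), ("flour + water", "flour-and-water"), ("7 adams", "7-adams"), ("nari", "nari"),
  ("flour + water pizzeria - north beach", "fw-pizzeria-north-beach"), ("casaro osteria", "casaro-osteria"),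
  ("napizza", "napizza"), ("sisterita", "sisterita"), ("mission chinese food sf", "mission-chinese-food-sf"),
  ("shuggie's", "shuggies"), ("penny roma", "penny-roma"), ("brenda's meat & three", "brendas-meat-and-three"),
  ("spqr", "spqr"), ("wizards and wands", "wizards-and-wands"), ("kin khao", "kin-khao")]

-- Termination support for the port of A's `while "--" in slug` loop:
-- repD is what one `slug.replace("--", "-")` computes (replace_dd below), and it shortens the string.
def repD : List Char → List Char
  | [] => []
  | c :: t => if c = '-' ∧ t.head? = some '-' then '-' :: repD t.tail else c :: repD t
termination_by l => l.length
decreasing_by all_goals simp [List.length_tail]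

theorem repD_nil : repD [] = [] := by rw [repD]

theorem repD_cons_pair (t : List Char) : repD ('-' :: '-' :: t) = '-' :: repD t := by
  rw [repD]; simp

theorem repD_cons_ne (c : Char) (t : List Char) (h : ¬ (c = '-' ∧ t.head? = some '-')) :
    repD (c :: t) = c :: repD t := by
  rw [repD]; rw [if_neg h]

theorem repD_go (fuel : Nat) : ∀ (s acc : List Char), s.length ≤ fuel →
    PySem.Chars.replace.go ['-', '-'] ['-'] fuel s acc = acc.reverse ++ repD s := by
  induction fuel with
  | zero =>
    intro s acc h
    have hs : s = [] := List.length_eq_zero_iff.mp (Nat.le_zero.mp h)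
    subst hs; simp [PySem.Chars.replace.go, repD_nil]
  | succ n ih =>
    intro s acc h
    match s with
    | [] => simp [PySem.Chars.replace.go, repD_nil]
    | [c] =>
      simp only [PySem.Chars.replace.go]
      rw [if_neg (by simp [List.isPrefixOf])]
      rw [ih [] (c :: acc) (by simp)]
      rw [repD_cons_ne c [] (by simp)]
      simp [repD_nil]
    | a :: b :: t =>
      simp only [PySem.Chars.replace.go]
      by_cases hab : a = '-' ∧ b = '-'
      · obtain ⟨rfl, rfl⟩ := hab
        rw [if_pos (by simp [List.isPrefixOf])]
        have hd : List.drop (['-', '-'] : List Char).length ('-' :: '-' :: t) = t := rfl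
        rw [hd, ih t _ (by simp at h ⊢; omega)]
        rw [repD_cons_pair]; simp
      · rw [if_neg (by simp [List.isPrefixOf]; intro h1 h2; exact hab ⟨h1.symm, h2.symm⟩)]
        rw [ih (b :: t) (a :: acc) (by simp at h ⊢; omega)]
        rw [repD_cons_ne a (b :: t) (by simpa using fun h1 h2 => hab ⟨h1, h2⟩)]
        simp

theorem replace_dd (s : List Char) : PySem.Chars.replace s ['-', '-'] ['-'] = repD s := by
  simpa [PySem.Chars.replace] using repD_go s.length s [] le_rfl

theorem repD_length_le (s : List Char) : (repD s).length ≤ s.length := by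
  fun_induction repD with
  | case1 => simp
  | case2 c t h ih => simp [List.length_tail] at ih ⊢; omega
  | case3 c t h ih => simpa using ih

theorem repD_length_lt (s : List Char) (h : ['-', '-'] <:+: s) : (repD s).length < s.length := by
  fun_induction repD with
  | case1 => simp at h
  | case2 c t hc ih =>
    obtain ⟨rfl, hh⟩ := hc
    cases t with
    | nil => simp at hh
    | cons d t' =>
      simp at hh; subst hh
      have := repD_length_le t'
      simp at this ⊢; omega
  | case3 c t hc ih =>
    have ht : ['-', '-'] <:+: t := by
      rcases h with ⟨p, q, hpq⟩
      match p, hpq with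
      | [], hpq =>
        exfalso; apply hc
        cases t with
        | nil => simp at hpq
        | cons d t' => simp at hpq; exact ⟨hpq.1.symm, by simp [← hpq.2.1]⟩
      | x :: p, hpq =>
        simp at hpq
        exact ⟨p, q, by simpa using hpq.2⟩
    have := ih ht; simp at this ⊢; omega

theorem collapse_step_lt (s : List Char) (h : PySem.Chars.isIn ['-', '-'] s = true) :
    (PySem.Chars.replace s ['-', '-'] ['-']).length < s.length := by
  rw [replace_dd]; exact repD_length_lt s ((PySem.Chars.isIn_iff_infix _ _).mp h)

-- the `while "--" in slug: slug = slug.replace("--", "-")` loop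
def collapseLoop (s : List Char) : List Char :=
  if h : PySem.Chars.isIn ['-', '-'] s = true then
    collapseLoop (PySem.Chars.replace s ['-', '-'] ['-'])
  else s
termination_by s.length
decreasing_by exact collapse_step_lt s h

def get_venue_slug (restaurant_name : String) : String :=
  let name_lower := PySem.Str.lower restaurant_name
  match venueMapping.get? name_lower with
  | some v => v
  | none =>
    let slug := PySem.Str.replace (PySem.Str.replace (PySem.Str.replace
      (PySem.Str.replace name_lower " " "-") "+" "") "'" "") "&" "and"
    let slug := String.mk (slug.toList.filter (fun c => PySem.Chars.isalnum c || c == '-'))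
    let slug := String.mk (collapseLoop slug.toList)
    PySem.Str.stripChars slug "-"

-- ===== PORT B =====
def slugGo : List Char → Bool → List Char → List Char
  | [], _, out => out
  | c :: rest, pending, out =>
    if c == ' ' || c == '-' then slugGo rest true out
    else if c == '&' then
      slugGo rest false (out ++ (if pending && !out.isEmpty then ['-'] else []) ++ ['a', 'n', 'd'])
    else if PySem.Chars.isalnum c then
      slugGo rest false (out ++ (if pending && !out.isEmpty then ['-'] else []) ++ [c])
    else slugGo rest pending out

def get_venue_slug_alt (restaurant_name : String) : String :=
  let name_lower := PySem.Str.lower restaurant_name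
  match venueMapping.get? name_lower with
  | some v => v
  | none => String.mk (slugGo name_lower.toList false [])

-- ===== PRECONDITION & SPEC =====
def Spec_get_venue_slug (restaurant_name : String) (out : String) : Prop := out = get_venue_slug_alt restaurant_name
instance (restaurant_name : String) (out : String) : Decidable (Spec_get_venue_slug restaurant_name out) := by unfold Spec_get_venue_slug; infer_instance

-- ===== CLAIM (what is proved, stated in full; the proofs are below) =====
def Claim_equal_get_venue_slug : Prop := ∀ (restaurant_name : String), Dom_get_venue_slug restaurant_name → Spec_get_venue_slug restaurant_name (get_venue_slug restaurant_name)

-- ===== LEMMAS AND PROOFS =====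

-- dash-run collapse, written with a "previous output char was a dash" flag
def sqS : List Char → Bool → List Char
  | [], _ => []
  | c :: t, b => if c = '-' then (if b then sqS t true else '-' :: sqS t true) else c :: sqS t false

-- per-character contribution of A's replace-chain + filter
def gC (c : Char) : List Char :=
  if c = ' ' then ['-']
  else if c = '+' then []
  else if c = '\'' then []
  else if c = '&' then ['a', 'n', 'd']
  else if PySem.Chars.isalnum c || c == '-' then [c] else []

-- sqS over the flatMap of gC, fused into one scan
def midF : List Char → Bool → List Char
  | [], _ => []
  | c :: t, b =>
    if c = ' ' ∨ c = '-' then (if b then midF t true else '-' :: midF t true)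
    else if c = '&' then 'a' :: 'n' :: 'd' :: midF t false
    else if PySem.Chars.isalnum c then c :: midF t false
    else midF t b

-- what B appends once its output is nonempty (pending = dash owed before next emission)
def bodyF : List Char → Bool → List Char
  | [], _ => []
  | c :: t, p =>
    if c = ' ' ∨ c = '-' then bodyF t true
    else if c = '&' then (if p then ['-'] else []) ++ 'a' :: 'n' :: 'd' :: bodyF t false
    else if PySem.Chars.isalnum c then (if p then ['-'] else []) ++ c :: bodyF t false
    else bodyF t p

-- B's result from an empty output buffer
def leadF : List Char → List Char
  | [] => []
  | c :: t =>
    if c = ' ' ∨ c = '-' then leadF t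
    else if c = '&' then 'a' :: 'n' :: 'd' :: bodyF t false
    else if PySem.Chars.isalnum c then c :: bodyF t false
    else leadF t

def dashB (c : Char) : Bool := c == '-'

-- right-strip of dashes
def rsd (m : List Char) : List Char := (List.dropWhile dashB m.reverse).reverse

theorem rep1_go (a : Char) (w : List Char) (fuel : Nat) : ∀ (s acc : List Char), s.length ≤ fuel →
    PySem.Chars.replace.go [a] w fuel s acc = acc.reverse ++ s.flatMap (fun c => if c = a then w else [c]) := by
  induction fuel with
  | zero =>
    intro s acc h
    have hs : s = [] := List.length_eq_zero_iff.mp (Nat.le_zero.mp h)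
    subst hs; simp [PySem.Chars.replace.go]
  | succ n ih =>
    intro s acc h
    match s with
    | [] => simp [PySem.Chars.replace.go]
    | c :: t =>
      simp only [PySem.Chars.replace.go]
      by_cases hca : a = c
      · subst hca
        rw [if_pos (by simp [List.isPrefixOf])]
        have hd : List.drop ([a] : List Char).length (a :: t) = t := rfl
        rw [hd, ih t _ (by simp at h ⊢; omega)]
        simp
      · rw [if_neg (by simp [List.isPrefixOf]; exact fun hh => hca hh)]
        rw [ih t (c :: acc) (by simp at h ⊢; omega)]
        simp [List.flatMap_cons, if_neg (fun hh : c = a => hca hh.symm)]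

theorem replace_single (s : List Char) (a : Char) (w : List Char) :
    PySem.Chars.replace s [a] w = s.flatMap (fun c => if c = a then w else [c]) := by
  simpa [PySem.Chars.replace] using rep1_go a w s.length s [] le_rfl

theorem sqS_repD (l : List Char) (b : Bool) : sqS (repD l) b = sqS l b := by
  fun_induction repD generalizing b with
  | case1 => rfl
  | case2 c t hc ih =>
    obtain ⟨rfl, hh⟩ := hc
    cases t with
    | nil => simp at hh
    | cons d t' =>
      simp at hh; subst hh
      simp only [List.tail_cons] at ih ⊢
      cases b <;> simp [sqS, ih]
  | case3 c t hc ih =>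
    by_cases hc' : c = '-'
    · subst hc'; cases b <;> simp [sqS, ih]
    · simp [sqS, hc', ih]

theorem sqS_noPair_aux (l : List Char) :
    (¬ (['-', '-'] <:+: l) → sqS l false = l) ∧
    (¬ (['-', '-'] <:+: l) → l.head? ≠ some '-' → sqS l true = l) := by
  induction l with
  | nil => simp [sqS]
  | cons c t ih =>
    have hsub : ¬ (['-', '-'] <:+: (c :: t)) → ¬ (['-', '-'] <:+: t) :=
      fun h ht => h (List.infix_cons ht)
    constructor
    · intro h
      by_cases hc : c = '-'
      · subst hc
        have hth : t.head? ≠ some '-' := by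
          intro hh
          cases t with
          | nil => simp at hh
          | cons d t' => simp at hh; exact h ⟨[], t', by simp [hh]⟩
        simp [sqS, ih.2 (hsub h) hth]
      · simp [sqS, hc, ih.1 (hsub h)]
    · intro h hhd
      have hc : c ≠ '-' := by simpa using hhd
      simp [sqS, hc, ih.1 (hsub h)]

theorem sqS_noPair (l : List Char) (h : ¬ (['-', '-'] <:+: l)) : sqS l false = l :=
  (sqS_noPair_aux l).1 h

theorem collapseLoop_eq (s : List Char) : collapseLoop s = sqS s false := by
  fun_induction collapseLoop with
  | case1 s h ih =>
    rw [replace_dd] at ih ⊢; rw [ih, sqS_repD]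
  | case2 s h =>
    have hni : ¬ (['-', '-'] <:+: s) := by
      have : PySem.Chars.isIn ['-', '-'] s = false := by
        cases hb : PySem.Chars.isIn ['-', '-'] s
        · rfl
        · exact absurd hb h
      exact (PySem.Chars.isIn_eq_false_iff _ _).mp this
    exact (sqS_noPair s hni).symm

theorem chain_filter_eq (l : List Char) :
    ((((l.flatMap (fun c => if c = ' ' then ['-'] else [c])).flatMap
        (fun c => if c = '+' then [] else [c])).flatMap
        (fun c => if c = '\'' then [] else [c])).flatMap
        (fun c => if c = '&' then ['a', 'n', 'd'] else [c])).filter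
        (fun c => PySem.Chars.isalnum c || c == '-') = l.flatMap gC := by
  induction l with
  | nil => simp
  | cons c t ih =>
    simp only [List.flatMap_cons, List.flatMap_append, List.filter_append, ih]
    congr 1
    by_cases h1 : c = ' '
    · subst h1; decide
    by_cases h2 : c = '+'
    · subst h2; decide
    by_cases h3 : c = '\''
    · subst h3; decide
    by_cases h4 : c = '&'
    · subst h4; decide
    simp [h1, h2, h3, h4, gC, List.filter_singleton]

theorem isalnum_ne_dash (c : Char) (h : PySem.Chars.isalnum c = true) : ¬ (c = '-') := by
  intro hc; subst hc; simp [PySem.Chars.isalnum, PySem.Chars.isalpha, PySem.Chars.isdigit,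
    PySem.Chars.isupper, PySem.Chars.islower] at h

theorem mid_eq (l : List Char) (b : Bool) : sqS (l.flatMap gC) b = midF l b := by
  induction l generalizing b with
  | nil => rfl
  | cons c t ih =>
    simp only [List.flatMap_cons]
    by_cases h1 : c = ' '
    · subst h1; cases b <;> simp [gC, sqS, midF, ih]
    by_cases hd : c = '-'
    · subst hd; cases b <;> simp [gC, sqS, midF, ih]
    by_cases h2 : c = '+'
    · subst h2; simp [gC, sqS, midF, ih, (by decide : PySem.Chars.isalnum '+' = false)]
    by_cases h3 : c = '\''
    · subst h3; simp [gC, sqS, midF, ih, (by decide : PySem.Chars.isalnum '\'' = false)]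
    by_cases h4 : c = '&'
    · subst h4; simp [gC, sqS, midF, ih]
    by_cases h5 : PySem.Chars.isalnum c = true
    · simp [gC, sqS, midF, h1, hd, h2, h3, h4, h5, ih]
    · simp [gC, sqS, midF, h1, hd, h2, h3, h4, h5, ih]

theorem mid_dropWhile (l : List Char) :
    List.dropWhile dashB (midF l false) = midF l true ∧
    List.dropWhile dashB (midF l true) = midF l true := by
  induction l with
  | nil => simp [midF]
  | cons c t ih =>
    by_cases h1 : c = ' ' ∨ c = '-'
    · simp [midF, h1, List.dropWhile, dashB, ih.2]
    by_cases h4 : c = '&'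
    · subst h4; simp [midF, List.dropWhile, dashB]
    by_cases h5 : PySem.Chars.isalnum c = true
    · have hdc : dashB c = false := by simp [dashB]; exact isalnum_ne_dash c h5
      simp [midF, h1, h4, h5, List.dropWhile, hdc]
    · simp [midF, h1, h4, h5, ih.1, ih.2]

theorem rsd_append (e m : List Char) (hne : e ≠ [])
    (he : List.dropWhile dashB e.reverse = e.reverse) : rsd (e ++ m) = e ++ rsd m := by
  unfold rsd
  rw [List.reverse_append, List.dropWhile_append]
  by_cases hmt : (List.dropWhile dashB m.reverse).isEmpty = true
  · rw [if_pos hmt, he]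
    have : List.dropWhile dashB m.reverse = [] := by simpa using hmt
    simp [this]
  · rw [if_neg hmt, List.reverse_append]; simp

theorem rsd_mid (l : List Char) :
    rsd (midF l false) = bodyF l false ∧ rsd ('-' :: midF l true) = bodyF l true := by
  induction l with
  | nil => constructor <;> simp [midF, bodyF, rsd, dashB]
  | cons c t ih =>
    by_cases h1 : c = ' ' ∨ c = '-'
    · constructor
      · simp only [midF, bodyF, if_pos h1]
        exact ih.2
      · simp only [midF, bodyF, if_pos h1]
        exact ih.2
    by_cases h4 : c = '&'
    · subst h4
      have e1 := rsd_append ['a', 'n', 'd'] (midF t false) (by simp) (by decide)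
      have e2 := rsd_append ['-', 'a', 'n', 'd'] (midF t false) (by simp) (by decide)
      simp at e1 e2
      constructor
      · simp [midF, bodyF, h1, e1, ih.1]
      · simp [midF, bodyF, h1, e2, ih.1]
    by_cases h5 : PySem.Chars.isalnum c = true
    · have hdc : dashB c = false := by simp [dashB]; exact isalnum_ne_dash c h5
      have e1 := rsd_append [c] (midF t false) (by simp) (by simp [List.dropWhile, hdc])
      have e2 := rsd_append ['-', c] (midF t false) (by simp) (by simp [List.dropWhile, hdc])
      simp at e1 e2
      constructor
      · simp [midF, bodyF, h1, h4, h5, e1, ih.1]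
      · simp [midF, bodyF, h1, h4, h5, e2, ih.1]
    · constructor
      · simp only [midF, bodyF, if_neg h1, if_neg h4, if_neg h5]
        exact ih.1
      · simp only [midF, bodyF, if_neg h1, if_neg h4, if_neg h5]
        exact ih.2

theorem rsd_mid_true (l : List Char) : rsd (midF l true) = leadF l := by
  induction l with
  | nil => simp [midF, leadF, rsd]
  | cons c t ih =>
    by_cases h1 : c = ' ' ∨ c = '-'
    · simp only [midF, leadF, if_pos h1]; exact ih
    by_cases h4 : c = '&'
    · subst h4
      have e1 := rsd_append ['a', 'n', 'd'] (midF t false) (by simp) (by decide)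
      simp at e1
      simp [midF, leadF, h1, e1, (rsd_mid t).1]
    by_cases h5 : PySem.Chars.isalnum c = true
    · have hdc : dashB c = false := by simp [dashB]; exact isalnum_ne_dash c h5
      have e1 := rsd_append [c] (midF t false) (by simp) (by simp [List.dropWhile, hdc])
      simp at e1
      simp [midF, leadF, h1, h4, h5, e1, (rsd_mid t).1]
    · simp only [midF, leadF, if_neg h1, if_neg h4, if_neg h5]; exact ih

theorem slugGo_body (l : List Char) (p : Bool) (out : List Char) (h : out ≠ []) :
    slugGo l p out = out ++ bodyF l p := by
  induction l generalizing p out with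
  | nil => simp [slugGo, bodyF]
  | cons c t ih =>
    have hie : out.isEmpty = false := by simpa using h
    by_cases h1 : c = ' ' ∨ c = '-'
    · have hb : (c == ' ' || c == '-') = true := by
        rcases h1 with h1 | h1 <;> simp [h1]
      simp only [slugGo, hb, if_pos rfl, if_true]
      rw [ih _ _ h]
      simp [bodyF, h1]
    · have hb : (c == ' ' || c == '-') = false := by
        simp at h1; simp [h1.1, h1.2]
      by_cases h4 : c = '&'
      · subst h4
        simp only [slugGo, hb, Bool.false_eq_true, if_false, beq_self_eq_true, if_pos rfl, if_true,
          hie, Bool.not_false, Bool.and_true]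
        rw [ih _ _ (by simp)]
        simp [bodyF, h1, List.append_assoc]
      · have hb4 : (c == '&') = false := by simp [h4]
        by_cases h5 : PySem.Chars.isalnum c = true
        · simp only [slugGo, hb, hb4, Bool.false_eq_true, if_false, h5, if_pos rfl, if_true,
            hie, Bool.not_false, Bool.and_true]
          rw [ih _ _ (by simp)]
          simp [bodyF, h1, h4, h5, List.append_assoc]
        · have hb5 : PySem.Chars.isalnum c = false := by simpa using h5
          simp only [slugGo, hb, hb4, hb5, Bool.false_eq_true, if_false]
          rw [ih _ _ h]
          simp [bodyF, h1, h4, h5]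

theorem slugGo_lead (l : List Char) (p : Bool) : slugGo l p [] = leadF l := by
  induction l generalizing p with
  | nil => rfl
  | cons c t ih =>
    by_cases h1 : c = ' ' ∨ c = '-'
    · have hb : (c == ' ' || c == '-') = true := by
        rcases h1 with h1 | h1 <;> simp [h1]
      simp only [slugGo, hb, if_pos rfl, if_true]
      rw [ih]
      simp [leadF, h1]
    · have hb : (c == ' ' || c == '-') = false := by
        simp at h1; simp [h1.1, h1.2]
      by_cases h4 : c = '&'
      · subst h4
        simp only [slugGo, hb, Bool.false_eq_true, if_false, beq_self_eq_true, if_pos rfl, if_true,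
          List.isEmpty_nil, Bool.not_true, Bool.and_false, List.nil_append]
        rw [slugGo_body t false ['a', 'n', 'd'] (by simp)]
        simp [leadF, h1]
      · have hb4 : (c == '&') = false := by simp [h4]
        by_cases h5 : PySem.Chars.isalnum c = true
        · simp only [slugGo, hb, hb4, Bool.false_eq_true, if_false, h5, if_pos rfl, if_true,
            List.isEmpty_nil, Bool.not_true, Bool.and_false, List.nil_append]
          rw [slugGo_body t false [c] (by simp)]
          simp [leadF, h1, h4, h5]
        · have hb5 : PySem.Chars.isalnum c = false := by simpa using h5
          simp only [slugGo, hb, hb4, hb5, Bool.false_eq_true, if_false]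
          rw [ih]
          simp [leadF, h1, h4, h5]

-- ===== VERDICT (by name: the statement is the Claim_ definition above) =====
theorem get_venue_slug_spec : Claim_equal_get_venue_slug := by
  intro s _
  unfold Spec_get_venue_slug get_venue_slug get_venue_slug_alt
  cases hm : venueMapping.get? (PySem.Str.lower s) with
  | some v => simp [hm]
  | none =>
    simp only [hm]
    apply String.toList_inj.mp
    simp only [pysem]
    have hmk : ∀ l : List Char, (String.mk l).toList = l := fun _ => Eq.symm (String.ofList_eq.mp rfl)
    have hsp : (" " : String).toList = [' '] := rfl
    have hds : ("-" : String).toList = ['-'] := rfl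
    have hpl : ("+" : String).toList = ['+'] := rfl
    have hqt : ("'" : String).toList = ['\''] := rfl
    have hmp : ("&" : String).toList = ['&'] := rfl
    have hem : ("" : String).toList = [] := rfl
    have hand : ("and" : String).toList = ['a', 'n', 'd'] := rfl
    rw [hmk, hmk, hsp, hds, hpl, hqt, hmp, hem, hand]
    rw [replace_single, replace_single, replace_single, replace_single]
    rw [chain_filter_eq, collapseLoop_eq, mid_eq]
    have hpd : (fun c => List.contains ['-'] c) = dashB := by
      funext c; simp only [dashB]; rw [Bool.eq_iff_iff]; simp
    have hrsd : ∀ x : List Char, (List.dropWhile dashB x.reverse).reverse = rsd x := fun _ => rfl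
    simp only [PySem.Chars.stripChars, hpd]
    rw [(mid_dropWhile _).1, hrsd, rsd_mid_true, slugGo_lead]
    exact (hmk _).symm
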